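-- pv_equiv track=rewrite | github.com/DevelopmentCats/AppBinHub | scripts/config.py | normalize_architecture
-- ===== SOURCE A (Python) =====
-- ARCHITECTURE_MAPPING = {
--     # Common architecture names to standard names
--     'x86_64': 'x86_64',
--     'amd64': 'x86_64',
--     'x64': 'x86_64',
--     'intel': 'x86_64',
--     'i386': 'i386',
--     'i686': 'i386',
--     '32bit': 'i386',
--     'armv7l': 'armv7l',
--     'armhf': 'armv7l',
--     'arm': 'armv7l',
--     'aarch64': 'aarch64',
--     'arm64': 'aarch64',
--     # Add more as needed
-- }
--
-- def normalize_architecture(arch_string):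
--     """Normalize architecture string to standard format"""
--     if not arch_string:
--         return 'x86_64'  # Default to x86_64
--
--     arch_lower = arch_string.lower()
--
--     # Direct mapping first
--     if arch_lower in ARCHITECTURE_MAPPING:
--         return ARCHITECTURE_MAPPING[arch_lower]
--
--     # Pattern matching for complex strings
--     if any(x in arch_lower for x in ['x86_64', 'amd64', 'x64']):
--         return 'x86_64'
--     elif any(x in arch_lower for x in ['i386', 'i686', '32bit']):
--         return 'i386'
--     elif any(x in arch_lower for x in ['aarch64', 'arm64']):
--         return 'aarch64'
--     elif 'arm' in arch_lower:
--         return 'armv7l'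
--
--     # Default fallback
--     return 'x86_64'
-- ===== SOURCE B (Python) =====
-- # Single ordered rules table; the dict lookup of A is redundant (every key's
-- # value agrees with the pattern cascade / default), so B drops it.
-- RULES = [
--     ('x86_64', ('x86_64', 'amd64', 'x64')),
--     ('i386', ('i386', 'i686', '32bit')),
--     ('aarch64', ('aarch64', 'arm64')),
--     ('armv7l', ('arm',)),
-- ]
--
-- def normalize_architecture(arch_string):
--     """Normalize architecture string to standard format"""
--     if not arch_string:
--         return 'x86_64'
--     arch_lower = arch_string.lower()
--     for canonical, patterns in RULES:
--         if any(p in arch_lower for p in patterns):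
--             return canonical
--     return 'x86_64'
-- ===== Notes on version B (the rewrite author's own statement) =====
-- stated objective: simpler
-- what changed: Replaced A's dict lookup plus if/elif cascade by one ordered rules table scanned by a single loop; the dict is dropped entirely because every key's mapped value coincides with the pattern cascade's (or the default's) answer.
import Mathlib
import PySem

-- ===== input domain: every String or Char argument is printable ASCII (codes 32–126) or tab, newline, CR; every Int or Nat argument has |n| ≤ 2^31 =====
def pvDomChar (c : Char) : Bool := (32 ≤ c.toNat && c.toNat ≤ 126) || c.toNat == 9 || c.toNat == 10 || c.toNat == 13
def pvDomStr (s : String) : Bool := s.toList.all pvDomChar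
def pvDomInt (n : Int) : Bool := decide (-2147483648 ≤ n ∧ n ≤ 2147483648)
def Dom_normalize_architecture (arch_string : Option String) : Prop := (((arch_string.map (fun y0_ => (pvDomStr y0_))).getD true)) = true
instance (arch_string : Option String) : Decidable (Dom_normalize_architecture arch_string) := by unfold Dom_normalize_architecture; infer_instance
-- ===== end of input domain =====

-- B replaces A's dict lookup + if/elif cascade with a single ordered rules table
-- scanned by one loop (the dict is provably redundant); objective: simpler.

-- ===== PORT A =====
def ARCHITECTURE_MAPPING : PySem.Dict String String := PySem.Dict.ofList
  [("x86_64", "x86_64"), ("amd64", "x86_64"), ("x64", "x86_64"), ("intel", "x86_64"),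
   ("i386", "i386"), ("i686", "i386"), ("32bit", "i386"),
   ("armv7l", "armv7l"), ("armhf", "armv7l"), ("arm", "armv7l"),
   ("aarch64", "aarch64"), ("arm64", "aarch64")]

def normalize_architecture (arch_string : Option String) : String :=
  match arch_string with
  | none => "x86_64"
  | some s =>
    if s = "" then "x86_64"
    else
      let arch_lower := PySem.Str.lower s
      match ARCHITECTURE_MAPPING.get? arch_lower with
      | some v => v
      | none =>
        if ["x86_64", "amd64", "x64"].any (fun x => PySem.Str.isIn x arch_lower) then "x86_64"
        else if ["i386", "i686", "32bit"].any (fun x => PySem.Str.isIn x arch_lower) then "i386"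
        else if ["aarch64", "arm64"].any (fun x => PySem.Str.isIn x arch_lower) then "aarch64"
        else if PySem.Str.isIn "arm" arch_lower then "armv7l"
        else "x86_64"

-- ===== PORT B =====
def RULES : List (String × List String) :=
  [("x86_64", ["x86_64", "amd64", "x64"]),
   ("i386", ["i386", "i686", "32bit"]),
   ("aarch64", ["aarch64", "arm64"]),
   ("armv7l", ["arm"])]

def firstRule : List (String × List String) → String → String
  | [], _ => "x86_64"
  | (canonical, patterns) :: rest, arch_lower =>
    if patterns.any (fun p => PySem.Str.isIn p arch_lower) then canonical
    else firstRule rest arch_lower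

def normalize_architecture_alt (arch_string : Option String) : String :=
  match arch_string with
  | none => "x86_64"
  | some s =>
    if s = "" then "x86_64"
    else firstRule RULES (PySem.Str.lower s)

-- ===== PRECONDITION & SPEC =====
def Spec_normalize_architecture (arch_string : Option String) (out : String) : Prop := out = normalize_architecture_alt arch_string
instance (arch_string : Option String) (out : String) : Decidable (Spec_normalize_architecture arch_string out) := by unfold Spec_normalize_architecture; infer_instance

-- ===== CLAIM (what is proved, stated in full; the proofs are below) =====
def Claim_equal_normalize_architecture : Prop := ∀ (arch_string : Option String), Dom_normalize_architecture arch_string → Spec_normalize_architecture arch_string (normalize_architecture arch_string)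

-- ===== LEMMAS AND PROOFS =====

-- the literal dict, evaluated
theorem arch_mapping_eq : ARCHITECTURE_MAPPING = PySem.Dict.mk
  [("x86_64", "x86_64"), ("amd64", "x86_64"), ("x64", "x86_64"), ("intel", "x86_64"),
   ("i386", "i386"), ("i686", "i386"), ("32bit", "i386"),
   ("armv7l", "armv7l"), ("armhf", "armv7l"), ("arm", "armv7l"),
   ("aarch64", "aarch64"), ("arm64", "aarch64")] := by
  decide

-- on every lowered string the A-side body equals the single table scan
theorem body_eq (al : String) :
    (match ARCHITECTURE_MAPPING.get? al with
     | some v => v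
     | none =>
       if ["x86_64", "amd64", "x64"].any (fun x => PySem.Str.isIn x al) then "x86_64"
       else if ["i386", "i686", "32bit"].any (fun x => PySem.Str.isIn x al) then "i386"
       else if ["aarch64", "arm64"].any (fun x => PySem.Str.isIn x al) then "aarch64"
       else if PySem.Str.isIn "arm" al then "armv7l"
       else "x86_64") = firstRule RULES al := by
  by_cases h1 : al = "x86_64"; · subst h1; decide
  by_cases h2 : al = "amd64"; · subst h2; decide
  by_cases h3 : al = "x64"; · subst h3; decide
  by_cases h4 : al = "intel"; · subst h4; decide
  by_cases h5 : al = "i386"; · subst h5; decide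
  by_cases h6 : al = "i686"; · subst h6; decide
  by_cases h7 : al = "32bit"; · subst h7; decide
  by_cases h8 : al = "armv7l"; · subst h8; decide
  by_cases h9 : al = "armhf"; · subst h9; decide
  by_cases h10 : al = "arm"; · subst h10; decide
  by_cases h11 : al = "aarch64"; · subst h11; decide
  by_cases h12 : al = "arm64"; · subst h12; decide
  have hget : ARCHITECTURE_MAPPING.get? al = none := by
    rw [arch_mapping_eq]
    simp [PySem.Dict.get?_mk_cons,
      Ne.symm h1, Ne.symm h2, Ne.symm h3, Ne.symm h4, Ne.symm h5, Ne.symm h6,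
      Ne.symm h7, Ne.symm h8, Ne.symm h9, Ne.symm h10, Ne.symm h11, Ne.symm h12, PySem.Dict.get?]
  rw [hget]
  simp only [firstRule, RULES, List.any_cons, List.any_nil, Bool.or_false]

-- ===== VERDICT (by name: the statement is the Claim_ definition above) =====
theorem normalize_architecture_spec : Claim_equal_normalize_architecture := by
  intro arch_string _
  unfold Spec_normalize_architecture normalize_architecture normalize_architecture_alt
  match arch_string with
  | none => rfl
  | some s =>
    by_cases hs : s = ""
    · simp [hs]
    · simp only [hs, if_false]
      exact body_eq (PySem.Str.lower s)
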